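-- pv_equiv track=rewrite | github.com/hhqx/leetcode | LocalEditor/6186.按位或最大的最小子数组长度.py | smallestSubarrays
-- ===== SOURCE A (Python) =====
-- from typing import List
--
-- def smallestSubarrays(nums: List[int]) -> List[int]:
--     def maxThen(a, b):
--         """ 判断除零元素外是否 a[i] > b[i] 均成立. """
--         for i in range(len(a)):
--             if a[i] != 0 and a[i] <= b[i]:
--                 return False
--         return True
--
--     # 后缀和求每个位上bit1的累加数
--     bits = [0] * 32
--     orResult = []
--     for i in range(len(nums)-1, -1, -1):
--         for j in range(len(bits)):
--             if (nums[i] >> j) & 1: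
--                 bits[j] += 1
--         orResult.insert(0, bits[:])
--
--     # 双指针判断区间[left,right]内各个bit和: orResult[left]-orResult[right] 是否均大于等于1
--     ans = [0] * len(nums)
--     right = len(nums) - 1
--     for left in range(len(nums)-1, -1, -1):
--         while right > left and maxThen(orResult[left], orResult[right]):
--                 right -= 1
--                 if right < 0:
--                     break
--         ans[left] = right - left + 1
--
--     return ans
-- ===== SOURCE B (Python) =====
-- def smallestSubarrays(nums):
--     n = len(nums)
--     last = [-1] * 32          # last[j] = nearest index >= i whose number has bit j set, or -1
--     ans = [0] * n
--     for i in range(n - 1, -1, -1):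
--         x = nums[i]
--         for j in range(32):
--             if (x >> j) & 1:
--                 last[j] = i
--         m = i
--         for v in last:
--             if v > m:
--                 m = v
--         ans[i] = m - i + 1
--     return ans
-- ===== Notes on version B (the rewrite author's own statement) =====
-- stated objective: faster
-- what changed: Replaces A's per-index 32-entry suffix bit-count vectors (built with O(n) insert(0) each step) plus a two-pointer shrink comparing whole count vectors with a single right-to-left pass that keeps, per bit, the nearest index where it occurs; the answer at i is max(i, those nearest indices) - i + 1.
import Mathlib
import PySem

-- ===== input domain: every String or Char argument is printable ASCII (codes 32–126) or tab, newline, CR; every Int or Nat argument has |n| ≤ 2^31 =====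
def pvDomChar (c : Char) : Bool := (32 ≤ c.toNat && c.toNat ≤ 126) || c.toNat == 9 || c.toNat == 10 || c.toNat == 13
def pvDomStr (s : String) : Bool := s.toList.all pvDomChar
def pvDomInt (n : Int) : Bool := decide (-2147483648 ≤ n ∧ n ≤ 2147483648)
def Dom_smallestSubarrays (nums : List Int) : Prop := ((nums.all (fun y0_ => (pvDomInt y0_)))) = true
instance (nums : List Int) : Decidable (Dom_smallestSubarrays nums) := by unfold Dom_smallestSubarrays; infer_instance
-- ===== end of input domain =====

-- B replaces A's suffix bit-count vectors + two-pointer shrink by one right-to-left pass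
-- keeping, per bit, the nearest index where it occurs (objective: faster).


-- ===== PORT A =====

-- `(x >> j) & 1` tested for truthiness, shared by both ports ('>>' on a Python int is Lean's '>>>').
def pyBit (j : Nat) (x : Int) : Bool := decide (PySem.Int.band (x >>> j) 1 ≠ 0)

-- A's maxThen: scan i over range(len(a)); the case of a longer first list is unreachable here
-- (both arguments always have length 32).
def maxThen : List Int → List Int → Bool
  | [], _ => true
  | _ :: _, [] => true
  | a :: as, b :: bs => if a ≠ 0 ∧ a ≤ b then false else maxThen as bs

-- the inner `for j in range(len(bits)): if (nums[i] >> j) & 1: bits[j] += 1`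
def addBits (x : Int) (bits : List Int) : List Int :=
  bits.mapIdx (fun j c => if pyBit j x then c + 1 else c)

-- A's first loop (i from len-1 downto 0, orResult.insert(0, bits[:])), as the structural
-- recursion it is: returns (bits, orResult).
def buildA : List Int → List Int × List (List Int)
  | [] => (List.replicate 32 0, [])
  | x :: xs =>
    let p := buildA xs
    let bits' := addBits x p.1
    (bits', bits' :: p.2)

-- A's inner `while right > left and maxThen(orResult[left], orResult[right]): right -= 1`
-- (the `if right < 0: break` is unreachable since the guard keeps right > left ≥ 0).
def shrinkA (orR : List (List Int)) (left : Nat) (right : Nat) : Nat :=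
  if h : left < right ∧
      maxThen (PySem.List.pyGetD orR (left : Int) []) (PySem.List.pyGetD orR (right : Int) []) then
    shrinkA orR left (right - 1)
  else right
termination_by right
decreasing_by omega

-- A's second loop: left from len-1 downto 0, ans[left] = right - left + 1 (entries prepended).
def loopA (orR : List (List Int)) : Nat → Nat → List Int → List Int
  | left, right, acc =>
    let r := shrinkA orR left right
    let acc' := ((r : Int) - (left : Int) + 1) :: acc
    match left with
    | 0 => acc'
    | l + 1 => loopA orR l r acc'
termination_by left _ _ => left

def smallestSubarrays (nums : List Int) : List Int :=
  let orR := (buildA nums).2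
  match nums.length with
  | 0 => []
  | n + 1 => loopA orR n n []

-- ===== PORT B =====

-- right-to-left pass: last[j] = nearest index ≥ i carrying bit j (or -1); the answer at i is
-- max(i, last entries) - i + 1.  Returns (last, ans-suffix).
def goB : List Int → Nat → List Int × List Int
  | [], _ => (List.replicate 32 (-1), [])
  | x :: xs, i =>
    let p := goB xs (i + 1)
    let last := p.1.mapIdx (fun j v => if pyBit j x then (i : Int) else v)
    let m := last.foldl (fun m v => if v > m then v else m) (i : Int)
    (last, (m - (i : Int) + 1) :: p.2)

def smallestSubarrays_alt (nums : List Int) : List Int := (goB nums 0).2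

-- ===== PRECONDITION & SPEC =====
def Spec_smallestSubarrays (nums : List Int) (out : List Int) : Prop := out = smallestSubarrays_alt nums
instance (nums : List Int) (out : List Int) : Decidable (Spec_smallestSubarrays nums out) := by unfold Spec_smallestSubarrays; infer_instance

-- ===== CLAIM (what is proved, stated in full; the proofs are below) =====
def Claim_equal_smallestSubarrays : Prop := ∀ (nums : List Int), Dom_smallestSubarrays nums → Spec_smallestSubarrays nums (smallestSubarrays nums)

-- ===== LEMMAS AND PROOFS =====

-- The common specification both ports are reduced to: per-bit suffix counts (bitsL/orL), and
-- maxRel l = the largest first-occurrence offset of a bit present in l (0 if none).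
def bitsL (l : List Int) : List Int := (List.range 32).map fun j => (l.countP (pyBit j) : Int)

def orL : List Int → List (List Int)
  | [] => []
  | x :: xs => bitsL (x :: xs) :: orL xs

def maxRel (l : List Int) : Int :=
  ((List.range 32).map fun j =>
    if l.any (pyBit j) then (l.findIdx (pyBit j) : Int) else 0).foldl max 0

def ansSpec : List Int → List Int
  | [] => []
  | x :: xs => (maxRel (x :: xs) + 1) :: ansSpec xs

theorem mapIdx_map_range {α β : Type} (f : Nat → α) (g : Nat → α → β) (k : Nat) :
    ((List.range k).map f).mapIdx g = (List.range k).map (fun j => g j (f j)) := by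
  apply List.ext_getElem <;> simp

theorem buildA_fst (l : List Int) : (buildA l).1 = bitsL l := by
  induction l with
  | nil => decide
  | cons x xs ih =>
    show addBits x (buildA xs).1 = _
    rw [ih]
    unfold addBits bitsL
    rw [mapIdx_map_range]
    apply List.map_congr_left
    intro j _
    by_cases h : pyBit j x <;> simp [h]

theorem buildA_snd (l : List Int) : (buildA l).2 = orL l := by
  induction l with
  | nil => rfl
  | cons x xs ih =>
    show (addBits x (buildA xs).1) :: (buildA xs).2 = _
    rw [ih, orL]
    congr 1
    rw [show addBits x (buildA xs).1 = (buildA (x :: xs)).1 from rfl, buildA_fst]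

theorem orL_getD (l : List Int) (k : Nat) (hk : k < l.length) :
    (orL l).getD k [] = bitsL (l.drop k) := by
  induction l generalizing k with
  | nil => simp at hk
  | cons x xs ih =>
    cases k with
    | zero => rfl
    | succ k => simpa [orL] using ih k (by simpa using hk)

theorem orL_pyGetD (l : List Int) (k : Nat) (hk : k < l.length) :
    PySem.List.pyGetD (orL l) (k : Int) [] = bitsL (l.drop k) := by
  rw [PySem.List.pyGetD_natCast, orL_getD l k hk]

theorem maxThen_map (js : List Nat) (f g : Nat → Int) :
    maxThen (js.map f) (js.map g) = true ↔ ∀ j ∈ js, f j = 0 ∨ g j < f j := by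
  induction js with
  | nil => simp [maxThen]
  | cons j js ih =>
    simp only [List.map_cons, maxThen]
    by_cases h : f j ≠ 0 ∧ f j ≤ g j
    · simp only [if_pos h]
      constructor
      · intro hc; exact absurd hc (by simp)
      · intro hall
        rcases hall j (by simp) with h0 | hlt
        · exact absurd h0 h.1
        · omega
    · rw [if_neg h, ih]
      constructor
      · intro hall k hk
        rcases List.mem_cons.mp hk with rfl | hk
        · by_cases hf : f k = 0
          · exact Or.inl hf
          · exact Or.inr (by omega)
        · exact hall k hk
      · intro hall k hk; exact hall k (List.mem_cons_of_mem _ hk)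

theorem any_take (l : List Int) (p : Int → Bool) (d : Nat) :
    (l.take d).any p = (l.any p && decide (l.findIdx p < d)) := by
  induction l generalizing d with
  | nil => simp
  | cons x xs ih =>
    cases d with
    | zero => simp
    | succ d =>
      by_cases hx : p x
      · simp [hx, List.findIdx_cons]
      · simp [hx, List.findIdx_cons, ih d]

theorem countP_drop_lt (l : List Int) (p : Int → Bool) (d : Nat) :
    (l.drop d).countP p < l.countP p ↔ (l.any p = true ∧ l.findIdx p < d) := by
  have hsplit : l.countP p = (l.take d).countP p + (l.drop d).countP p := by
    conv_lhs => rw [← List.take_append_drop d l]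
    rw [List.countP_append]
  rw [hsplit]
  have h1 : 0 < (l.take d).countP p ↔ (l.take d).any p = true := by
    rw [List.countP_pos_iff, List.any_eq_true]
  rw [any_take] at h1
  simp only [Bool.and_eq_true, decide_eq_true_eq] at h1
  constructor
  · intro h; exact h1.mp (by omega)
  · intro h; have := h1.mpr h; omega

theorem maxRel_nonneg (l : List Int) : 0 ≤ maxRel l :=
  (PySem.List.le_foldl_max _ 0).1

theorem findIdx_le_maxRel (l : List Int) (j : Nat) (hj : j < 32) (h : l.any (pyBit j) = true) :
    (l.findIdx (pyBit j) : Int) ≤ maxRel l := by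
  have := (PySem.List.le_foldl_max ((List.range 32).map fun j =>
      if l.any (pyBit j) then (l.findIdx (pyBit j) : Int) else 0) 0).2
  have hm := this _ (List.mem_map.mpr ⟨j, List.mem_range.mpr hj, rfl⟩)
  rw [if_pos h] at hm
  exact hm

theorem maxRel_cases (l : List Int) :
    maxRel l = 0 ∨ ∃ j, j < 32 ∧ l.any (pyBit j) = true ∧ maxRel l = (l.findIdx (pyBit j) : Int) := by
  rcases PySem.List.foldl_max_mem ((List.range 32).map fun j =>
      if l.any (pyBit j) then (l.findIdx (pyBit j) : Int) else 0) 0 with h0 | hmem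
  · exact Or.inl h0
  · rcases List.mem_map.mp hmem with ⟨j, hj, hv⟩
    by_cases hp : l.any (pyBit j) = true
    · rw [if_pos hp] at hv
      exact Or.inr ⟨j, List.mem_range.mp hj, hp, hv.symm⟩
    · rw [if_neg hp] at hv
      exact Or.inl hv.symm

theorem countP_eq_zero_of_not_any (l : List Int) (p : Int → Bool) (hp : ¬ l.any p = true) :
    l.countP p = 0 := by
  by_contra hne
  have hpos : 0 < l.countP p := Nat.pos_of_ne_zero hne
  rcases List.countP_pos_iff.mp hpos with ⟨a, ha, hpa⟩
  exact hp (List.any_eq_true.mpr ⟨a, ha, hpa⟩)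

theorem maxThen_bits (l : List Int) (d : Nat) (hd : 1 ≤ d) :
    (maxThen (bitsL l) (bitsL (l.drop d)) = true) ↔ maxRel l < (d : Int) := by
  unfold bitsL
  rw [maxThen_map]
  constructor
  · intro hall
    rcases maxRel_cases l with h0 | ⟨j, hj, hp, hv⟩
    · rw [h0]; exact_mod_cast hd
    · rw [hv]
      rcases hall j (List.mem_range.mpr hj) with h0 | hlt
      · exfalso
        rcases List.any_eq_true.mp hp with ⟨a, ha, hpa⟩
        have : 0 < l.countP (pyBit j) := List.countP_pos_iff.mpr ⟨a, ha, hpa⟩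
        omega
      · have := (countP_drop_lt l (pyBit j) d).mp (by exact_mod_cast hlt)
        exact_mod_cast this.2
  · intro hlt j hj
    by_cases hp : l.any (pyBit j) = true
    · right
      have h1 : l.findIdx (pyBit j) < d := by
        have := findIdx_le_maxRel l j (List.mem_range.mp hj) hp
        omega
      have := (countP_drop_lt l (pyBit j) d).mpr ⟨hp, h1⟩
      exact_mod_cast this
    · left
      exact_mod_cast countP_eq_zero_of_not_any l (pyBit j) hp

theorem maxRel_cons_le (x : Int) (xs : List Int) : maxRel (x :: xs) ≤ 1 + maxRel xs := by
  rcases maxRel_cases (x :: xs) with h0 | ⟨j, hj, hp, hv⟩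
  · rw [h0]; have := maxRel_nonneg xs; omega
  · rw [hv, List.findIdx_cons]
    by_cases hx : pyBit j x
    · simp only [hx, cond_true]; have := maxRel_nonneg xs; push_cast; omega
    · simp only [hx, cond_false]
      have hpxs : xs.any (pyBit j) = true := by
        rcases List.any_eq_true.mp hp with ⟨a, ha, hpa⟩
        rcases List.mem_cons.mp ha with rfl | ha
        · exact absurd hpa (by simpa using hx)
        · exact List.any_eq_true.mpr ⟨a, ha, hpa⟩
      have := findIdx_le_maxRel xs j hj hpxs
      push_cast; omega

theorem maxRel_singleton (y : Int) : maxRel [y] = 0 := by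
  apply le_antisymm _ (maxRel_nonneg _)
  rcases maxRel_cases [y] with h0 | ⟨j, hj, hp, hv⟩
  · rw [h0]
  · rw [hv]
    have : pyBit j y = true := by simpa using hp
    simp [List.findIdx_cons, this]

theorem shrinkA_eq (nums : List Int) (left : Nat) (r : Nat) (hl : left < nums.length)
    (hr : r < nums.length) (hlr : left ≤ r)
    (hE : (left : Int) + maxRel (nums.drop left) ≤ (r : Int)) :
    ((shrinkA (orL nums) left r : Nat) : Int) = (left : Int) + maxRel (nums.drop left) := by
  induction r using Nat.strong_induction_on with
  | _ r ih =>
    rw [shrinkA]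
    by_cases hcase : (r : Int) = (left : Int) + maxRel (nums.drop left)
    · rw [dif_neg]
      · exact hcase
      · rintro ⟨h1, h2⟩
        rw [orL_pyGetD nums left hl, orL_pyGetD nums r hr] at h2
        have hdrop : nums.drop r = (nums.drop left).drop (r - left) := by
          rw [List.drop_drop]
          congr 1
          omega
        rw [hdrop] at h2
        have := (maxThen_bits (nums.drop left) (r - left) (by omega)).mp h2
        have hc : ((r - left : Nat) : Int) = (r : Int) - (left : Int) := by omega
        omega
    · have hlt : (left : Int) + maxRel (nums.drop left) < (r : Int) :=
        lt_of_le_of_ne hE (fun h => hcase h.symm)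
      have h1 : left < r := by
        have := maxRel_nonneg (nums.drop left)
        omega
      have h2 : maxThen (PySem.List.pyGetD (orL nums) (left : Int) [])
          (PySem.List.pyGetD (orL nums) (r : Int) []) = true := by
        rw [orL_pyGetD nums left hl, orL_pyGetD nums r hr]
        have hdrop : nums.drop r = (nums.drop left).drop (r - left) := by
          rw [List.drop_drop]
          congr 1
          omega
        rw [hdrop]
        apply (maxThen_bits (nums.drop left) (r - left) (by omega)).mpr
        have hc : ((r - left : Nat) : Int) = (r : Int) - (left : Int) := by omega
        omega
      rw [dif_pos ⟨h1, h2⟩]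
      exact ih (r - 1) (by omega) (by omega) (by omega) (by omega)

theorem loopA_eq (nums : List Int) (left : Nat) (r : Nat) (hl : left < nums.length)
    (hr : r < nums.length) (hlr : left ≤ r)
    (hE : (left : Int) + maxRel (nums.drop left) ≤ (r : Int)) (acc : List Int) :
    loopA (orL nums) left r acc
      = (List.range (left + 1)).map (fun i => maxRel (nums.drop i) + 1) ++ acc := by
  induction left generalizing r acc with
  | zero =>
    rw [loopA]
    have hs := shrinkA_eq nums 0 r hl hr hlr hE
    simp only [hs]
    simp
  | succ left' ih =>
    rw [loopA]
    have hs := shrinkA_eq nums (left' + 1) r hl hr hlr hE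
    set r' := shrinkA (orL nums) (left' + 1) r with hr'
    have hentry : ((r' : Int) - ((left' + 1 : Nat) : Int) + 1)
        = maxRel (nums.drop (left' + 1)) + 1 := by omega
    have hmono : maxRel (nums.drop left') ≤ 1 + maxRel (nums.drop (left' + 1)) := by
      rw [List.drop_eq_getElem_cons (show left' < nums.length by omega)]
      exact maxRel_cons_le _ _
    have hrec := ih r' (by omega)
      (by have := maxRel_nonneg (nums.drop (left' + 1)); omega)
      (by have := maxRel_nonneg (nums.drop (left' + 1)); omega)
      (by omega)
      ((((r' : Nat) : Int) - ((left' + 1 : Nat) : Int) + 1) :: acc)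
    rw [hrec, hentry]
    conv_rhs => rw [List.range_succ, List.map_append]
    simp

theorem ansSpec_eq (l : List Int) :
    ansSpec l = (List.range l.length).map (fun i => maxRel (l.drop i) + 1) := by
  induction l with
  | nil => rfl
  | cons x xs ih =>
    rw [ansSpec, List.length_cons, List.range_succ_eq_map, List.map_cons, List.map_map]
    rw [ih]
    congr 1

theorem foldl_last_eq (l : List Int) (i : Nat) :
    (((List.range 32).map fun j =>
        if l.any (pyBit j) then ((i : Int) + (l.findIdx (pyBit j) : Int)) else -1)).foldl
      (fun m v => if v > m then v else m) (i : Int) = (i : Int) + maxRel l := by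
  have hstep : (fun (m v : Int) => if v > m then v else m) = (max : Int → Int → Int) := by
    funext m v
    rw [max_def]
    split_ifs <;> omega
  rw [hstep]
  set L := ((List.range 32).map fun j =>
      if l.any (pyBit j) then ((i : Int) + (l.findIdx (pyBit j) : Int)) else -1) with hL
  apply le_antisymm
  · rcases PySem.List.foldl_max_mem L (i : Int) with h0 | hmem
    · rw [h0]; have := maxRel_nonneg l; omega
    · rcases List.mem_map.mp hmem with ⟨j, hj, hv⟩
      rw [← hv]
      by_cases hp : l.any (pyBit j) = true
      · rw [if_pos hp]
        have := findIdx_le_maxRel l j (List.mem_range.mp hj) hp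
        omega
      · rw [if_neg hp]
        have := maxRel_nonneg l
        omega
  · have hub := (PySem.List.le_foldl_max L (i : Int)).2
    have hi := (PySem.List.le_foldl_max L (i : Int)).1
    rcases maxRel_cases l with h0 | ⟨j, hj, hp, hv⟩
    · rw [h0]; omega
    · rw [hv]
      have hm : (if l.any (pyBit j) then ((i : Int) + (l.findIdx (pyBit j) : Int)) else -1) ∈ L :=
        List.mem_map.mpr ⟨j, List.mem_range.mpr hj, rfl⟩
      rw [if_pos hp] at hm
      have := hub _ hm
      omega

theorem goB_spec (l : List Int) (i : Nat) :
    (goB l i).1 = ((List.range 32).map fun j =>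
        if l.any (pyBit j) then ((i : Int) + (l.findIdx (pyBit j) : Int)) else -1)
    ∧ (goB l i).2 = ansSpec l := by
  induction l generalizing i with
  | nil =>
    constructor
    · show List.replicate 32 (-1) = _
      simp
    · rfl
  | cons x xs ih =>
    have h1 : (goB (x :: xs) i).1
        = ((List.range 32).map fun j =>
            if (x :: xs).any (pyBit j) then ((i : Int) + ((x :: xs).findIdx (pyBit j) : Int))
            else -1) := by
      show ((goB xs (i + 1)).1.mapIdx (fun j v => if pyBit j x then (i : Int) else v)) = _
      rw [(ih (i + 1)).1, mapIdx_map_range]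
      apply List.map_congr_left
      intro j _
      by_cases hx : pyBit j x
      · simp [hx, List.findIdx_cons]
      · simp only [hx, List.any_cons, Bool.false_or, List.findIdx_cons, cond_false]
        by_cases hp : xs.any (pyBit j) = true
        · rw [if_pos hp, if_pos hp]
          push_cast
          ring
        · simp [hp]
    refine ⟨h1, ?_⟩
    show ((goB (x :: xs) i).1.foldl (fun m v => if v > m then v else m) (i : Int) - (i : Int) + 1)
        :: (goB xs (i + 1)).2 = _
    rw [h1, foldl_last_eq (x :: xs) i, (ih (i + 1)).2, ansSpec]
    congr 1
    omega

theorem a_eq_spec (nums : List Int) : smallestSubarrays nums = ansSpec nums := by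
  cases nums with
  | nil => rfl
  | cons x xs =>
    show loopA (buildA (x :: xs)).2 xs.length xs.length [] = ansSpec (x :: xs)
    rw [buildA_snd]
    have hsing : (x :: xs).drop xs.length = [(x :: xs)[xs.length]'(by simp)] := by
      rw [List.drop_eq_getElem_cons (by simp)]
      congr 1
      exact List.drop_length (l := x :: xs)
    rw [loopA_eq (x :: xs) xs.length xs.length (by simp) (by simp) (le_refl _)
      (by rw [hsing, maxRel_singleton]; omega) []]
    rw [ansSpec_eq]
    simp

theorem b_eq_spec (nums : List Int) : smallestSubarrays_alt nums = ansSpec nums :=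
  (goB_spec nums 0).2

-- ===== VERDICT (by name: the statement is the Claim_ definition above) =====
theorem smallestSubarrays_spec : Claim_equal_smallestSubarrays := by
  intro nums _
  show smallestSubarrays nums = smallestSubarrays_alt nums
  rw [a_eq_spec, b_eq_spec]
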